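-- pv_equiv track=rewrite | github.com/jiyeonkim26/markdown-compiler | markdown_compiler/util/line_functions.py | compile_bold_stars
-- ===== SOURCE A (Python) =====
-- def compile_bold_stars(line):
--     '''
--     Convert "**bold**" to "<b>bold</b>".
--
--     HINT:
--     This function is similar to the strikethrough function.
--
--     >>> compile_bold_stars('**This is bold!** This is not bold.')
--     '<b>This is bold!</b> This is not bold.'
--     >>> compile_bold_stars('**This is bold!**')
--     '<b>This is bold!</b>'
--     >>> compile_bold_stars('This is **bold**!')
--     'This is <b>bold</b>!'
--     >>> compile_bold_stars('This is not **bold!')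
--     'This is not **bold!'
--     >>> compile_bold_stars('**')
--     '**'
--     '''
--     if line.count('**') < 2:
--         return line
--
--     accumulator = ''
--     has_opened = False
--     i = 0
--
--     while i < len(line):
--         if line[i:i + 2] == '**':
--             if not has_opened:
--                 accumulator += '<b>'
--                 has_opened = True
--             else:
--                 accumulator += '</b>'
--                 has_opened = False
--             i += 2
--         else:
--             accumulator += line[i]
--             i += 1
--     return accumulator
-- ===== SOURCE B (Python) =====
-- def compile_bold_stars(line):
--     if line.count('**') < 2:
--         return line
--     parts = line.split('**')
--     pieces = [parts[0]]
--     for k, part in enumerate(parts[1:]):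
--         pieces.append('<b>' if k % 2 == 0 else '</b>')
--         pieces.append(part)
--     return ''.join(pieces)
-- ===== Notes on version B (the rewrite author's own statement) =====
-- stated objective: simpler
-- what changed: Replaced the char-by-char index/state-flag while loop with a tokenize-then-reassemble pass: split the line on '**' and rejoin the parts with alternating '<b>'/'</b>' separators.
import Mathlib
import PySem

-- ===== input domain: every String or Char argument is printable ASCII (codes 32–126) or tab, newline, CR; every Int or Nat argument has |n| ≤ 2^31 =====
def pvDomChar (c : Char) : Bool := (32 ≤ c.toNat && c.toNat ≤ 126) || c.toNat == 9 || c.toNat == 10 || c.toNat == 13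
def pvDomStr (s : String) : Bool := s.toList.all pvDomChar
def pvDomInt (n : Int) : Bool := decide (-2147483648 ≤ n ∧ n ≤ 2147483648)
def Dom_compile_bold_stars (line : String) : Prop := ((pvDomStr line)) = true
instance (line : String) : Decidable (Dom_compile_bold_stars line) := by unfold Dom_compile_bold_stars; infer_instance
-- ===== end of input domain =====

-- B replaces A's char-by-char state-flag scan by split-on-'**' and rejoin with alternating tags (simpler; same cost).

-- ===== PORT A =====
-- the while loop: i/accumulator/has_opened state; 'line[i:i+2] == "**"' is exactly
-- 'the next two chars are *,*' (the slice clamps), i.e. ['*','*'].isPrefixOf rest.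
def pvAScan : List Char → Bool → List Char → List Char
  | [], _, acc => acc
  | l@(c :: rest), has_opened, acc =>
    if ['*','*'].isPrefixOf l then
      if !has_opened then pvAScan (l.drop 2) true (acc ++ ['<','b','>'])
      else pvAScan (l.drop 2) false (acc ++ ['<','/','b','>'])
    else pvAScan rest has_opened (acc ++ [c])
  termination_by l _ _ => l.length
  decreasing_by all_goals simp_all

def compile_bold_stars (line : String) : String :=
  if PySem.Str.count line "**" < 2 then line
  else String.ofList (pvAScan line.toList false [])

-- ===== PORT B =====
-- the 'for k, part in enumerate(parts[1:])' loop of Source B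
def pvGlue : Nat → List (List Char) → List Char
  | _, [] => []
  | k, p :: ps => (if k % 2 == 0 then ['<','b','>'] else ['<','/','b','>']) ++ p ++ pvGlue (k + 1) ps

def compile_bold_stars_alt (line : String) : String :=
  if PySem.Str.count line "**" < 2 then line
  else
    match PySem.Chars.splitOn line.toList ['*','*'] with   -- line.split('**')
    | [] => ""                                             -- unreachable: split never returns []
    | p :: ps => String.ofList (p ++ pvGlue 0 ps)

-- ===== PRECONDITION & SPEC =====
def Spec_compile_bold_stars (line : String) (out : String) : Prop := out = compile_bold_stars_alt line
instance (line : String) (out : String) : Decidable (Spec_compile_bold_stars line out) := by unfold Spec_compile_bold_stars; infer_instance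

-- ===== CLAIM (what is proved, stated in full; the proofs are below) =====
def Claim_equal_compile_bold_stars : Prop := ∀ (line : String), Dom_compile_bold_stars line → Spec_compile_bold_stars line (compile_bold_stars line)

-- ===== LEMMAS AND PROOFS =====

-- proof-side model of PySem.Chars.splitOn specialised to the separator ['*','*']
def pvSplit : List Char → List Char → List (List Char)
  | [], cur => [cur.reverse]
  | l@(c :: rest), cur =>
    if ['*','*'].isPrefixOf l then cur.reverse :: pvSplit (l.drop 2) []
    else pvSplit rest (c :: cur)
  termination_by l _ => l.length
  decreasing_by all_goals simp_all

theorem pvSplit_ne_nil (l cur : List Char) : pvSplit l cur ≠ [] := by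
  induction l generalizing cur with
  | nil => simp [pvSplit]
  | cons c rest ih =>
      rw [pvSplit]
      by_cases h : ['*','*'].isPrefixOf (c :: rest)
      · simp [h]
      · simp only [h, if_false, Bool.false_eq_true]
        exact ih _

theorem pvSplit_cur (l cur : List Char) :
    pvSplit l cur = (cur.reverse ++ (pvSplit l []).headI) :: (pvSplit l []).tail := by
  induction l generalizing cur with
  | nil => simp [pvSplit]
  | cons c rest ih =>
      rw [pvSplit, pvSplit]
      by_cases h : ['*','*'].isPrefixOf (c :: rest)
      · simp [h]
      · simp only [h, if_false, Bool.false_eq_true]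
        rw [ih (c :: cur), ih [c]]
        simp

theorem splitOn_go_eq (fuel : Nat) (l cur : List Char) (accs : List (List Char))
    (h : l.length < fuel) :
    PySem.Chars.splitOn.go ['*','*'] fuel l cur accs = accs.reverse ++ pvSplit l cur := by
  induction fuel generalizing l cur accs with
  | zero => omega
  | succ fuel ih =>
      match l with
      | [] => simp [PySem.Chars.splitOn.go, pvSplit]
      | c :: rest =>
          rw [PySem.Chars.splitOn.go, pvSplit]
          by_cases hp : ['*','*'].isPrefixOf (c :: rest)
          · simp only [hp, if_true]
            rw [ih _ _ _ (by simp at h ⊢; omega)]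
            simp
          · simp only [hp, if_false, Bool.false_eq_true]
            rw [ih _ _ _ (by simp at h ⊢; omega)]

theorem splitOn_eq (l : List Char) :
    PySem.Chars.splitOn l ['*','*'] = pvSplit l [] := by
  rw [PySem.Chars.splitOn]
  rw [splitOn_go_eq (l.length + 1) l [] [] (by omega)]
  simp

theorem scan_glue (l : List Char) (k : Nat) (acc : List Char) :
    pvAScan l (decide (k % 2 = 1)) acc
      = acc ++ (pvSplit l []).headI ++ pvGlue k (pvSplit l []).tail := by
  induction hn : l.length using Nat.strong_induction_on generalizing l k acc with
  | _ n ih =>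
  match l with
  | [] => simp [pvAScan, pvSplit, pvGlue]
  | c :: rest =>
      rw [pvAScan, pvSplit]
      by_cases hp : ['*','*'].isPrefixOf (c :: rest)
      · simp only [hp, if_true]
        rcases hq : pvSplit ((c :: rest).drop 2) [] with _ | ⟨q, qs⟩
        · exact absurd hq (pvSplit_ne_nil _ _)
        · have hlen : ((c :: rest).drop 2).length < n := by
            subst hn; simp
          by_cases hk : k % 2 = 0
          · have h1 : decide (k % 2 = 1) = false := by simp [hk]
            have h2 : decide ((k + 1) % 2 = 1) = true := by simp; omega
            rw [h1]
            simp only [Bool.not_false, if_true]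
            rw [← h2, ih _ hlen _ _ _ rfl, hq]
            simp [pvGlue, hk]
          · have h1 : decide (k % 2 = 1) = true := by simp; omega
            have h2 : decide ((k + 1) % 2 = 1) = false := by simp; omega
            rw [h1]
            simp only [Bool.not_true, Bool.false_eq_true, if_false]
            rw [← h2, ih _ hlen _ _ _ rfl, hq]
            have hk1 : ¬ (k % 2 = 0) := hk
            simp [pvGlue, hk1]
      · simp only [hp, if_false, Bool.false_eq_true]
        have hlen : rest.length < n := by subst hn; simp
        rw [ih _ hlen _ _ _ rfl, pvSplit_cur rest [c]]
        simp

-- ===== VERDICT (by name: the statement is the Claim_ definition above) =====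
theorem compile_bold_stars_spec : Claim_equal_compile_bold_stars := by
  intro line _
  unfold Spec_compile_bold_stars compile_bold_stars compile_bold_stars_alt
  split_ifs with h
  · rfl
  · rw [splitOn_eq]
    have h0 : (false : Bool) = decide (0 % 2 = 1) := by decide
    have := scan_glue line.toList 0 []
    rcases hne : pvSplit line.toList [] with _ | ⟨p, ps⟩
    · exact absurd hne (pvSplit_ne_nil _ _)
    · simp only [hne, List.headI, List.tail] at this
      rw [h0, this]
      simp
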